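-- pv_equiv track=rewrite | github.com/ais-lab/feat2map | utils/utils.py | get_experiment_name
-- ===== SOURCE A (Python) =====
-- def get_experiment_name(path):
--     """
--     Ex:
--         Input: "logs/7scenes_heads_configsV0/epoch_050.pth.tar"
--         -> Output: 7scenes_heads_configsV0
--     """
--     out = ''
--     s = False
--     for i in path:
--         if s:
--             out = out + i
--         if i == '/':
--             s = ~s
--     return out.rstrip(out[-1])
-- ===== SOURCE B (Python) =====
-- def get_experiment_name(path):
--     # split-based: join the odd-index '/'-separated segments (keeping the
--     # closing slash when one existed), then strip trailing copies of the
--     # last character, exactly as the original does.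
--     parts = path.split('/')
--     chunks = []
--     rest = parts[1:]
--     while rest:
--         chunks.append(rest[0])
--         if len(rest) > 1:
--             chunks.append('/')
--         rest = rest[2:]
--     out = ''.join(chunks)
--     return out.rstrip(out[-1])
-- ===== Notes on version B (the rewrite author's own statement) =====
-- stated objective: alternative
-- what changed: A scans char-by-char toggling a collect flag with bitwise ~ on each '/'; B instead splits the path on '/' once and joins the odd-index segments (re-adding the closing slash when one existed) before the same rstrip of the last character.
import Mathlib
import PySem

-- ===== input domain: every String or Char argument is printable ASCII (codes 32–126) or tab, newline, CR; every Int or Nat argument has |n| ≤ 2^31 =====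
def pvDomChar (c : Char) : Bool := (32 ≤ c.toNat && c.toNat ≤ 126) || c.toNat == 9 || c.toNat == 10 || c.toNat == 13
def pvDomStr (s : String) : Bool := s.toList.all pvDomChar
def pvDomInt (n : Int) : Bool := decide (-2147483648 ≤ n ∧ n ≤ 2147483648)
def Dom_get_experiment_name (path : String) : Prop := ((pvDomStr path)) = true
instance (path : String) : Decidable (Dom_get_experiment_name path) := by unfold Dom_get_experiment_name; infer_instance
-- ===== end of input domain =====

-- B replaces A's char-by-char scan with a `~`-toggled collect flag by a split-on-'/'
-- then join-odd-segments pass (same cost, different decomposition); equivalence proved on Pre_.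


-- ===== PORT A =====
-- one loop step of A: Python's bool False is the int 0 and `~s` is `-s-1`, truthiness is `≠ 0`
def stepA (acc : List Char × Int) (i : Char) : List Char × Int :=
  (if acc.2 ≠ 0 then acc.1 ++ [i] else acc.1,
   if i = '/' then -acc.2 - 1 else acc.2)

-- hand port of `out.rstrip(c)` for a single-character argument: drop trailing copies of c (exact there)
def rstrip1 (out : List Char) (c : Char) : List Char :=
  (out.reverse.dropWhile (· = c)).reverse

def get_experiment_name (path : String) : String :=
  let out := (path.toList.foldl stepA ([], 0)).1
  -- `out.rstrip(out[-1])`; Python raises IndexError when out = '' (excluded by Pre_)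
  match out.getLast? with
  | none => ""
  | some c => String.ofList (rstrip1 out c)

-- ===== PORT B =====
-- Source B's while-loop over `rest`: take rest[0], add '/' if more than one element remains, drop two
def bLoop : List (List Char) → List Char
  | [] => []
  | [p] => p
  | p :: _ :: rest => p ++ ['/'] ++ bLoop rest

def get_experiment_name_alt (path : String) : String :=
  let parts := PySem.Chars.splitOn path.toList ['/']
  let out := bLoop (parts.drop 1)
  match out.getLast? with
  | none => ""
  | some c => String.ofList (rstrip1 out c)

-- ===== PRECONDITION & SPEC =====
-- Pre_ excludes exactly the inputs where A raises IndexError (`out[-1]` on an empty collected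
-- string): paths with no '/' before their last character.  B raises there too.
def Pre_get_experiment_name (path : String) : Prop := '/' ∈ path.toList.dropLast
instance (path : String) : Decidable (Pre_get_experiment_name path) := by
  unfold Pre_get_experiment_name; infer_instance
def pvWitness_get_experiment_name : String := "logs/7scenes_heads_configsV0/epoch_050.pth.tar"

def Spec_get_experiment_name (path : String) (out : String) : Prop := out = get_experiment_name_alt path
instance (path : String) (out : String) : Decidable (Spec_get_experiment_name path out) := by unfold Spec_get_experiment_name; infer_instance

-- ===== CLAIM (what is proved, stated in full; the proofs are below) =====
def Claim_equal_get_experiment_name : Prop := ∀ (path : String), Dom_get_experiment_name path → Pre_get_experiment_name path → Spec_get_experiment_name path (get_experiment_name path)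

-- ===== LEMMAS AND PROOFS =====

-- reference spec: chars collected with the flag off / on
mutual
def offFn : List Char → List Char
  | [] => []
  | c :: cs => if c = '/' then onFn cs else offFn cs
def onFn : List Char → List Char
  | [] => []
  | c :: cs => if c = '/' then '/' :: offFn cs else c :: onFn cs
end

theorem foldA_spec (cs : List Char) : ∀ out : List Char,
    (cs.foldl stepA (out, 0)).1 = out ++ offFn cs ∧
    (cs.foldl stepA (out, -1)).1 = out ++ onFn cs := by
  induction cs with
  | nil => intro out; simp [offFn, onFn]
  | cons c cs ih =>
    intro out
    by_cases h : c = '/'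
    · constructor
      · simp only [List.foldl, stepA, h]
        norm_num
        rw [(ih out).2]
        simp [offFn]
      · simp only [List.foldl, stepA, h]
        norm_num
        rw [(ih (out ++ ['/'])).1]
        simp [onFn]
    · constructor
      · simp only [List.foldl, stepA, h]
        norm_num
        rw [(ih out).1]
        simp [offFn, h]
      · simp only [List.foldl, stepA, h]
        norm_num
        rw [(ih (out ++ [c])).2]
        simp [onFn, h]

-- reference recursion for str.split('/')
def mySplit (pre : List Char) : List Char → List (List Char)
  | [] => [pre]
  | c :: rest => if c = '/' then pre :: mySplit [] rest else mySplit (pre ++ [c]) rest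

theorem splitOn_go_eq (l : List Char) : ∀ (fuel : Nat) (cur : List Char) (acc : List (List Char)),
    l.length < fuel →
    PySem.Chars.splitOn.go ['/'] fuel l cur acc = acc.reverse ++ mySplit cur.reverse l := by
  induction l with
  | nil =>
    intro fuel cur acc h
    match fuel with
    | fuel + 1 => simp [PySem.Chars.splitOn.go, mySplit]
  | cons c rest ih =>
    intro fuel cur acc h
    match fuel with
    | fuel + 1 =>
      rw [PySem.Chars.splitOn.go]
      by_cases hc : c = '/'
      · have hpre : List.isPrefixOf ['/'] (c :: rest) = true := by
          simp [List.isPrefixOf, hc]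
        rw [if_pos hpre]
        have hdrop : List.drop ['/'].length (c :: rest) = rest := rfl
        rw [hdrop, ih fuel [] (cur.reverse :: acc) (by simpa using Nat.lt_of_succ_lt_succ h)]
        simp [mySplit, hc]
      · have hpre : ¬ (List.isPrefixOf ['/'] (c :: rest) = true) := by
          simp only [List.isPrefixOf, Bool.and_true, beq_iff_eq]
          exact fun hh => hc hh.symm
        rw [if_neg hpre]
        rw [ih fuel (c :: cur) acc (by simpa using Nat.lt_of_succ_lt_succ h)]
        simp [mySplit, hc]

theorem splitOn_eq_mySplit (cs : List Char) :
    PySem.Chars.splitOn cs ['/'] = mySplit [] cs := by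
  rw [PySem.Chars.splitOn, splitOn_go_eq cs (cs.length + 1) [] [] (Nat.lt_succ_self _)]
  simp

theorem mySplit_ne_nil (cs : List Char) : ∀ pre, mySplit pre cs ≠ [] := by
  induction cs with
  | nil => intro pre; simp [mySplit]
  | cons c rest ih =>
    intro pre
    by_cases h : c = '/' <;> simp [mySplit, h, ih]

theorem mySplit_pre (cs : List Char) : ∀ pre,
    mySplit pre cs = (mySplit [] cs).modifyHead (pre ++ ·) := by
  induction cs with
  | nil => intro pre; simp [mySplit]
  | cons c rest ih =>
    intro pre
    by_cases h : c = '/'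
    · simp [mySplit, h]
    · simp only [mySplit, if_neg h]
      simp only [List.nil_append]
      rw [ih (pre ++ [c]), ih [c]]
      cases hX : mySplit [] rest with
      | nil => exact absurd hX (mySplit_ne_nil rest [])
      | cons p tl => simp

theorem bLoop_modifyHead (pre p : List Char) (rest : List (List Char)) :
    bLoop ((p :: rest).modifyHead (pre ++ ·)) = pre ++ bLoop (p :: rest) := by
  cases rest with
  | nil => simp [bLoop]
  | cons q r => simp [bLoop]

theorem main_eq (cs : List Char) :
    bLoop ((mySplit [] cs).drop 1) = offFn cs ∧ bLoop (mySplit [] cs) = onFn cs := by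
  induction cs with
  | nil => simp [mySplit, bLoop, offFn, onFn]
  | cons c rest ih =>
    by_cases h : c = '/'
    · constructor
      · simp only [mySplit, if_pos h, offFn, List.drop_succ_cons, List.drop_zero]
        exact ih.2
      · simp only [mySplit, if_pos h, onFn]
        cases hX : mySplit [] rest with
        | nil => exact absurd hX (mySplit_ne_nil rest [])
        | cons p tl =>
          simp only [bLoop]
          have := ih.1
          rw [hX] at this
          simp at this
          simp [this]
    · constructor
      · simp only [mySplit, if_neg h, offFn, List.nil_append]
        rw [mySplit_pre rest [c]]
        cases hX : mySplit [] rest with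
        | nil => exact absurd hX (mySplit_ne_nil rest [])
        | cons p tl =>
          simp only [List.modifyHead, List.drop_succ_cons, List.drop_zero]
          have := ih.1
          rw [hX] at this
          simpa using this
      · simp only [mySplit, if_neg h, onFn, List.nil_append]
        rw [mySplit_pre rest [c]]
        cases hX : mySplit [] rest with
        | nil => exact absurd hX (mySplit_ne_nil rest [])
        | cons p tl =>
          rw [bLoop_modifyHead [c] p tl]
          have := ih.2
          rw [hX] at this
          simp [this]

theorem outs_eq (path : String) :
    (path.toList.foldl stepA ([], 0)).1
      = bLoop ((PySem.Chars.splitOn path.toList ['/']).drop 1) := by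
  rw [(foldA_spec path.toList []).1, splitOn_eq_mySplit, (main_eq path.toList).1]
  simp

-- ===== VERDICT (by name: the statement is the Claim_ definition above) =====
theorem get_experiment_name_spec : Claim_equal_get_experiment_name := by
  intro path _ _
  unfold Spec_get_experiment_name get_experiment_name get_experiment_name_alt
  rw [outs_eq path]
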